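-- pv_equiv track=rewrite | github.com/rebellions-sw/vllm-rbln | examples/optimum/run_decoder_only_simple.py | get_input_prompts
-- ===== SOURCE A (Python) =====
-- def get_input_prompts(num_input_prompt: int) -> list[str]:
--     base_prompts = [
--         "Hello, my name is",
--         "The president of the United States is",
--         "The capital of France is",
--         "The future of AI is",
--         "In a shocking finding, scientists discovered",
--         "The quick brown fox jumps over the lazy dog",
--         "To be or not to be, that is",
--         "Once upon a time in a land far, far away,",
--         "When is the next solar eclipse?",
--         "The recipe for a perfect chocolate cake includes",
--     ]
--
--     # Use modular arithmetic to cycle through prompts if num_input_prompt > len(base_prompts)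
--     return [base_prompts[i % len(base_prompts)] for i in range(num_input_prompt)]
-- ===== SOURCE B (Python) =====
-- def get_input_prompts(num_input_prompt: int) -> list[str]:
--     base_prompts = [
--         "Hello, my name is",
--         "The president of the United States is",
--         "The capital of France is",
--         "The future of AI is",
--         "In a shocking finding, scientists discovered",
--         "The quick brown fox jumps over the lazy dog",
--         "To be or not to be, that is",
--         "Once upon a time in a land far, far away,",
--         "When is the next solar eclipse?",
--         "The recipe for a perfect chocolate cake includes",
--     ]
--     # Rotating queue: emit the front prompt and move it to the back, once per
--     # requested prompt.  No index arithmetic and no replication.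
--     out = []
--     queue = list(base_prompts)
--     for _ in range(num_input_prompt):
--         p = queue.pop(0)
--         out.append(p)
--         queue.append(p)
--     return out
-- ===== Notes on version B (the rewrite author's own statement) =====
-- stated objective: alternative
-- what changed: Replaces per-index modular arithmetic (base_prompts[i % len]) with a rotating-queue single pass that pops the front prompt, emits it, and pushes it to the back, maintaining the rotation as loop state instead of computing it from the index.
import Mathlib
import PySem

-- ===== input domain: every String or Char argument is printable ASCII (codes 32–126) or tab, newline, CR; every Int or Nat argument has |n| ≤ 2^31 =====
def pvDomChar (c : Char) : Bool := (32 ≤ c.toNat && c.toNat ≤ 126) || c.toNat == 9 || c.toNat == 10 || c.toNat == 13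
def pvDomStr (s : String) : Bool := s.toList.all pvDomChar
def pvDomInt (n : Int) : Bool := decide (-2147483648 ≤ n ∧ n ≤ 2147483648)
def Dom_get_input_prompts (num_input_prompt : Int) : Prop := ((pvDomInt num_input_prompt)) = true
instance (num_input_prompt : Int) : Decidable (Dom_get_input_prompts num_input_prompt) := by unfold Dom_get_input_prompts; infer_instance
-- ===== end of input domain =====

-- B replaces per-index modular arithmetic with a rotating-queue single pass (pop front, emit, push back).

-- ===== PORT A =====
def get_input_prompts (num_input_prompt : Int) : List String :=
  let base_prompts : List String := [
    "Hello, my name is",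
    "The president of the United States is",
    "The capital of France is",
    "The future of AI is",
    "In a shocking finding, scientists discovered",
    "The quick brown fox jumps over the lazy dog",
    "To be or not to be, that is",
    "Once upon a time in a land far, far away,",
    "When is the next solar eclipse?",
    "The recipe for a perfect chocolate cake includes"]
  -- list comprehension over range(num_input_prompt); base_prompts[i % 10] is always in range
  (PySem.List.pyRange 0 num_input_prompt 1).map
    (fun i => PySem.List.pyGetD base_prompts (PySem.Int.mod i (base_prompts.length : Int)) "")

-- ===== PORT B =====
-- the for-loop of Source B: each iteration pops the queue's front, appends it to out, pushes it to the back.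
-- queue is never empty in Source B (it keeps length 10); the [] branch is unreachable there.
def pvRotLoop : Nat → List String → List String → List String
  | 0, _, out => out
  | n + 1, queue, out =>
    match queue with
    | [] => out
    | p :: rest => pvRotLoop n (rest ++ [p]) (out ++ [p])

def get_input_prompts_alt (num_input_prompt : Int) : List String :=
  let base_prompts : List String := [
    "Hello, my name is",
    "The president of the United States is",
    "The capital of France is",
    "The future of AI is",
    "In a shocking finding, scientists discovered",
    "The quick brown fox jumps over the lazy dog",
    "To be or not to be, that is",
    "Once upon a time in a land far, far away,",
    "When is the next solar eclipse?",
    "The recipe for a perfect chocolate cake includes"]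
  -- for _ in range(num_input_prompt) runs max(num_input_prompt, 0) times
  pvRotLoop num_input_prompt.toNat base_prompts []

-- ===== PRECONDITION & SPEC =====
def Spec_get_input_prompts (num_input_prompt : Int) (out : List String) : Prop := out = get_input_prompts_alt num_input_prompt
instance (num_input_prompt : Int) (out : List String) : Decidable (Spec_get_input_prompts num_input_prompt out) := by unfold Spec_get_input_prompts; infer_instance

-- ===== CLAIM (what is proved, stated in full; the proofs are below) =====
def Claim_equal_get_input_prompts : Prop := ∀ (num_input_prompt : Int), Dom_get_input_prompts num_input_prompt → Spec_get_input_prompts num_input_prompt (get_input_prompts num_input_prompt)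

-- ===== LEMMAS AND PROOFS =====

-- one rotation step: element j of the rotated queue is element j+1 of the original (cyclically)
theorem pvRotStep (p : String) (rest : List String) (j : Nat) :
    (rest ++ [p]).getD (j % (rest ++ [p]).length) ""
      = (p :: rest).getD ((j + 1) % (p :: rest).length) "" := by
  have hlen : (rest ++ [p]).length = rest.length + 1 := by simp
  rw [hlen]
  simp only [List.length_cons]
  set L := rest.length + 1 with hL
  have hr : j % L ≤ rest.length := by
    have := Nat.mod_lt j (show 0 < L by omega); omega
  have hm : (j + 1) % L = (j % L + 1 % L) % L := by rw [Nat.add_mod]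
  by_cases h : j % L < rest.length
  · have h1L : 1 % L = 1 := Nat.mod_eq_of_lt (by omega)
    have hs : (j + 1) % L = j % L + 1 := by
      rw [hm, h1L, Nat.mod_eq_of_lt (by omega)]
    rw [hs, List.getD_append _ _ _ _ h]
    simp [List.getD]
  · have hje : j % L = rest.length := by omega
    have hz : (j + 1) % L = 0 := by
      rw [hm, hje]
      by_cases hL1 : L = 1
      · simp [hL1, show rest.length = 0 by omega]
      · have h1L : 1 % L = 1 := Nat.mod_eq_of_lt (by omega)
        rw [h1L, hL]; simp
    rw [hz, hje, List.getD_append_right _ _ _ _ (le_refl _)]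
    simp [List.getD]

-- characterisation of the rotating loop: it emits q[j % |q|] at step j
theorem pvRotLoop_eq (n : Nat) : ∀ (q out : List String), q ≠ [] →
    pvRotLoop n q out = out ++ (List.range n).map (fun j => q.getD (j % q.length) "") := by
  induction n with
  | zero => intro q out _; simp [pvRotLoop]
  | succ n ih =>
    intro q out hq
    match q with
    | [] => exact absurd rfl hq
    | p :: rest =>
      have h0 : (p :: rest).getD (0 % (p :: rest).length) "" = p := by simp
      have hAB : List.map (fun j => (rest ++ [p]).getD (j % (rest ++ [p]).length) "") (List.range n)
          = List.map ((fun j => (p :: rest).getD (j % (p :: rest).length) "") ∘ Nat.succ) (List.range n) := by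
        apply List.map_congr_left
        intro j _
        simp only [Function.comp_apply, Nat.succ_eq_add_one]
        exact pvRotStep p rest j
      rw [pvRotLoop, ih (rest ++ [p]) (out ++ [p]) (by simp),
        List.range_succ_eq_map, List.map_cons, h0, hAB, List.map_map]
      simp

-- ===== VERDICT (by name: the statement is the Claim_ definition above) =====
theorem get_input_prompts_spec : Claim_equal_get_input_prompts := by
  intro n _
  unfold Spec_get_input_prompts get_input_prompts get_input_prompts_alt
  rw [pvRotLoop_eq _ _ _ (by simp), List.nil_append]
  simp only [List.length_cons, List.length_nil]
  norm_num
  by_cases hn : 0 ≤ n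
  · obtain ⟨m, rfl⟩ := Int.eq_ofNat_of_zero_le hn
    rw [PySem.List.pyRange_one]
    simp only [Int.sub_zero, Int.toNat_natCast, zero_add, List.map_map]
    apply List.map_congr_left
    intro j _
    simp only [Function.comp_apply]
    have h1 : ((j : Int)) % 10 = ((j % 10 : Nat) : Int) := by omega
    rw [h1, PySem.List.pyGetD_natCast]
    simp [List.getD]
  · rw [PySem.List.pyRange_one_eq_nil (by omega)]
    have h0 : n.toNat = 0 := by omega
    rw [h0]
    simp
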